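-- pv_equiv track=rewrite | github.com/dhanesh9/CS515 | Project2/bc2.py | remove_multi_comments
-- ===== SOURCE A (Python) =====
-- def remove_multi_comments(string):
--     result = ""
--     i = 0
--     while i < len(string):
--         if string[i:i + 2] == "/*":
--             i += 2
--             while i < len(string) and string[i:i + 2] != "*/":
--                 i += 1
--             i += 2
--         elif string[i:i + 2] == "//":
--             i += 2
--             while i < len(string) and string[i] != "\n":
--                 i += 1
--         else:
--             result += string[i]
--             i += 1
--     return result
-- ===== SOURCE B (Python) =====
-- def remove_multi_comments(string):
--     # One-pass state machine over the characters (no slicing, no rescans):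
--     # 0 = code, 1 = saw '/', 2 = in block comment, 3 = in block saw '*', 4 = in line comment.
--     out = []
--     state = 0
--     for c in string:
--         if state == 0:
--             if c == '/':
--                 state = 1
--             else:
--                 out.append(c)
--         elif state == 1:
--             if c == '*':
--                 state = 2
--             elif c == '/':
--                 state = 4
--             else:
--                 out.append('/')
--                 out.append(c)
--                 state = 0
--         elif state == 2:
--             if c == '*':
--                 state = 3
--         elif state == 3:
--             if c == '/':
--                 state = 0
--             elif c != '*':
--                 state = 2
--         else:
--             if c == '\n':
--                 out.append('\n')
--                 state = 0
--     if state == 1: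
--         out.append('/')
--     return "".join(out)
-- ===== Notes on version B (the rewrite author's own statement) =====
-- stated objective: faster
-- what changed: Replaced A's index-based while loop with two-character slice comparisons, nested skip loops and quadratic string concatenation by a single-pass five-state DFA that examines each character exactly once, appends to a list and joins.
import Mathlib
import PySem

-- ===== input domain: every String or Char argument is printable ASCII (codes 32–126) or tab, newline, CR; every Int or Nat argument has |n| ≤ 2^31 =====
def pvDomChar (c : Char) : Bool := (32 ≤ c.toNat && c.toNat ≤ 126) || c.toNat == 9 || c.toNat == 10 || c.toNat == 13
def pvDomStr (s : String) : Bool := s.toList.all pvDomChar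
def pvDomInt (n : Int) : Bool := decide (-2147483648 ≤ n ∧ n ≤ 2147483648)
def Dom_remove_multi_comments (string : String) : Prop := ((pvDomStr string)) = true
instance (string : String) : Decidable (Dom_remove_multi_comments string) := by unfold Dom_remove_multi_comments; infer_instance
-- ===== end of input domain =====

-- B replaces A's slice-based while loops by a one-pass 5-state DFA; return values proved equal on all strings.

-- ===== PORT A =====
-- inner while of the "/*" branch: while i < len and string[i:i+2] != "*/": i += 1; then i += 2.
-- Represented on the suffix of the string starting at i (index i ↔ dropping i characters).
def skipBlockA : List Char → List Char
  | [] => []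
  | '*' :: '/' :: r => r
  | _ :: r => skipBlockA r

-- inner while of the "//" branch: while i < len and string[i] != "\n": i += 1 (the '\n' is left in place).
def skipLineA : List Char → List Char
  | [] => []
  | '\n' :: r => '\n' :: r
  | _ :: r => skipLineA r

theorem skipBlockA_length_le (l : List Char) : (skipBlockA l).length ≤ l.length := by
  induction l using skipBlockA.induct <;> simp [skipBlockA] <;> omega

theorem skipLineA_length_le (l : List Char) : (skipLineA l).length ≤ l.length := by
  induction l using skipLineA.induct <;> simp [skipLineA] <;> omega

-- A's outer while loop on the suffix at position i: the branch tests string[i:i+2] == "/*" / "//"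
-- are the pattern matches on the first two characters; else emit string[i] and advance.
def loopA : List Char → List Char
  | [] => []
  | '/' :: '*' :: r => loopA (skipBlockA r)
  | '/' :: '/' :: r => loopA (skipLineA r)
  | c :: r => c :: loopA r
termination_by l => l.length
decreasing_by
  · have := skipBlockA_length_le r; simp; omega
  · have := skipLineA_length_le r; simp; omega
  · simp

def remove_multi_comments (string : String) : String :=
  String.mk (loopA string.toList)

-- ===== PORT B =====
-- Source B: per-character transition on (state, out); states 0 code, 1 saw '/', 2 in block, 3 in block saw '*', 4 in line.
def stepB (acc : Nat × List Char) (c : Char) : Nat × List Char :=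
  let (st, out) := acc
  if st = 0 then
    if c = '/' then (1, out) else (0, out ++ [c])
  else if st = 1 then
    if c = '*' then (2, out)
    else if c = '/' then (4, out)
    else (0, out ++ ['/', c])
  else if st = 2 then
    if c = '*' then (3, out) else (2, out)
  else if st = 3 then
    if c = '/' then (0, out)
    else if c ≠ '*' then (2, out) else (3, out)
  else
    if c = '\n' then (0, out ++ ['\n']) else (st, out)

-- Source B's trailing "if state == 1: out.append('/')" and the final join.
def finB (p : Nat × List Char) : List Char :=
  if p.1 = 1 then p.2 ++ ['/'] else p.2

def remove_multi_comments_alt (string : String) : String :=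
  String.mk (finB (string.toList.foldl stepB (0, [])))

-- ===== PRECONDITION & SPEC =====
def Spec_remove_multi_comments (string : String) (out : String) : Prop := out = remove_multi_comments_alt string
instance (string : String) (out : String) : Decidable (Spec_remove_multi_comments string out) := by unfold Spec_remove_multi_comments; infer_instance

-- ===== CLAIM (what is proved, stated in full; the proofs are below) =====
def Claim_equal_remove_multi_comments : Prop := ∀ (string : String), Dom_remove_multi_comments string → Spec_remove_multi_comments string (remove_multi_comments string)

-- ===== LEMMAS AND PROOFS =====

-- Functional rendering of B's fold: g st l = the characters B still emits from suffix l in state st.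
def g : Nat → List Char → List Char
  | 1, [] => ['/']
  | _, [] => []
  | 0, c :: r => if c = '/' then g 1 r else c :: g 0 r
  | 1, c :: r => if c = '*' then g 2 r else if c = '/' then g 4 r else '/' :: c :: g 0 r
  | 2, c :: r => if c = '*' then g 3 r else g 2 r
  | 3, c :: r => if c = '/' then g 0 r else if c ≠ '*' then g 2 r else g 3 r
  | st, c :: r => if c = '\n' then '\n' :: g 0 r else g st r

theorem foldB_eq_g (l : List Char) : ∀ (st : Nat) (out : List Char),
    finB (l.foldl stepB (st, out)) = out ++ g st l := by
  induction l with
  | nil =>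
    intro st out
    rcases st with _ | _ | _ | _ | st <;> simp [finB, g]
  | cons c r ih =>
    intro st out
    simp only [List.foldl_cons]
    rcases st with _ | _ | _ | _ | st <;>
      (simp only [stepB]; split_ifs <;> (rw [ih]; simp_all [g]))

theorem loopA_cons_ne (c : Char) (r : List Char) (hc : c ≠ '/') :
    loopA (c :: r) = c :: loopA r := by
  rw [loopA.eq_def]
  rcases r with _ | ⟨c2, r'⟩
  · simp [hc]
  · by_cases h : c2 = '*' <;> by_cases h' : c2 = '/' <;> simp_all

theorem loopA_eq_g : ∀ (n : Nat) (l : List Char), l.length ≤ n →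
    (g 0 l = loopA l) ∧ (g 2 l = loopA (skipBlockA l)) ∧
    (g 4 l = loopA (skipLineA l)) ∧ (g 3 l = loopA (skipBlockA ('*' :: l))) := by
  intro n
  induction n with
  | zero =>
    intro l hl
    have : l = [] := List.length_eq_zero_iff.mp (Nat.le_zero.mp hl)
    subst this
    simp [g, skipBlockA, skipLineA, loopA]
  | succ n ih =>
    intro l hl
    rcases l with _ | ⟨c, r⟩
    · simp [g, skipBlockA, skipLineA, loopA]
    · have hr : r.length ≤ n := by simpa using hl
      refine ⟨?_, ?_, ?_, ?_⟩
      · -- g 0 (c :: r) = loopA (c :: r)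
        by_cases hc : c = '/'
        · subst hc
          rcases r with _ | ⟨c2, r'⟩
          · simp [g, loopA]
          · have hr' : r'.length ≤ n := by simp at hr; omega
            by_cases h2 : c2 = '*'
            · subst h2; simp [g, loopA, (ih r' hr').2.1]
            · by_cases h3 : c2 = '/'
              · subst h3; simp [g, loopA, (ih r' hr').2.2.1]
              · have := (ih (c2 :: r') hr).1
                rw [show loopA ('/' :: c2 :: r') = '/' :: loopA (c2 :: r') by
                      rw [loopA.eq_def]; simp [h2, h3]]
                rw [show g 0 ('/' :: c2 :: r') = g 1 (c2 :: r') by simp [g]]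
                rw [show g 1 (c2 :: r') = '/' :: c2 :: g 0 r' by simp [g, h2, h3]]
                rw [show g 0 (c2 :: r') = c2 :: g 0 r' by simp [g, h3]] at this
                rw [← this]
        · rw [show g 0 (c :: r) = c :: g 0 r by simp [g, hc]]
          rw [loopA_cons_ne c r hc, (ih r hr).1]
      · -- g 2 (c :: r) = loopA (skipBlockA (c :: r))
        by_cases hc : c = '*'
        · subst hc
          rw [show g 2 ('*' :: r) = g 3 r by simp [g]]
          exact (ih r hr).2.2.2
        · rw [show g 2 (c :: r) = g 2 r by simp [g, hc]]
          rw [show skipBlockA (c :: r) = skipBlockA r by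
                rw [skipBlockA.eq_def]; rcases r with _ | ⟨c2, r'⟩ <;> simp [hc]]
          exact (ih r hr).2.1
      · -- g 4 (c :: r) = loopA (skipLineA (c :: r))
        by_cases hc : c = '\n'
        · subst hc
          rw [show g 4 ('\n' :: r) = '\n' :: g 0 r by simp [g]]
          rw [show skipLineA ('\n' :: r) = '\n' :: r by simp [skipLineA]]
          rw [loopA_cons_ne '\n' r (by decide), (ih r hr).1]
        · rw [show g 4 (c :: r) = g 4 r by simp [g, hc]]
          rw [show skipLineA (c :: r) = skipLineA r by rw [skipLineA.eq_def]; simp [hc]]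
          exact (ih r hr).2.2.1
      · -- g 3 (c :: r) = loopA (skipBlockA ('*' :: c :: r))
        by_cases hc : c = '/'
        · subst hc
          rw [show g 3 ('/' :: r) = g 0 r by simp [g]]
          rw [show skipBlockA ('*' :: '/' :: r) = r by simp [skipBlockA]]
          exact (ih r hr).1
        · by_cases hs : c = '*'
          · subst hs
            rw [show g 3 ('*' :: r) = g 3 r by simp [g]]
            rw [show skipBlockA ('*' :: '*' :: r) = skipBlockA ('*' :: r) by
                  rw [skipBlockA.eq_def]; simp]
            exact (ih r hr).2.2.2
          · rw [show g 3 (c :: r) = g 2 r by simp [g, hc, hs]]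
            rw [show skipBlockA ('*' :: c :: r) = skipBlockA (c :: r) by
                  rw [skipBlockA.eq_def]; simp [hc]]
            rw [show skipBlockA (c :: r) = skipBlockA r by
                  rw [skipBlockA.eq_def]; rcases r with _ | ⟨c2, r'⟩ <;> simp [hs]]
            exact (ih r hr).2.1

-- ===== VERDICT (by name: the statement is the Claim_ definition above) =====
theorem remove_multi_comments_spec : Claim_equal_remove_multi_comments := by
  intro string _
  unfold Spec_remove_multi_comments remove_multi_comments remove_multi_comments_alt
  rw [foldB_eq_g string.toList 0 [], List.nil_append,
      (loopA_eq_g string.toList.length string.toList le_rfl).1]
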